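-- pv_equiv track=rewrite | github.com/manassevisser-dot/huishoudApp | brace_audit.py | _find_marker_lines
-- ===== SOURCE A (Python) =====
-- from typing import List, Optional, Dict, Any, Tuple
--
-- def _find_marker_lines(lines: List[str], start_marker: Optional[str], end_marker: Optional[str]) -> Tuple[Optional[int], Optional[int]]:
--     start_marker_line = None
--     end_marker_line = None
--     if start_marker:
--         for i, ln in enumerate(lines, start=1):
--             if start_marker in ln:
--                 start_marker_line = i
--                 break
--     if end_marker:
--         for i, ln in enumerate(lines, start=1):
--             if end_marker in ln:
--                 end_marker_line = i
--                 break
--     return start_marker_line, end_marker_line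
-- ===== SOURCE B (Python) =====
-- from typing import List, Optional, Tuple
--
-- def _find_marker_lines(lines: List[str], start_marker: Optional[str], end_marker: Optional[str]) -> Tuple[Optional[int], Optional[int]]:
--     # Single fused pass maintaining both states, breaking once every active marker is found.
--     want_start = bool(start_marker)
--     want_end = bool(end_marker)
--     start_line = None
--     end_line = None
--     i = 0
--     for ln in lines:
--         i += 1
--         if want_start and start_line is None and start_marker in ln:
--             start_line = i
--         if want_end and end_line is None and end_marker in ln:
--             end_line = i
--         if (not want_start or start_line is not None) and (not want_end or end_line is not None):
--             break
--     return start_line, end_line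
-- ===== Notes on version B (the rewrite author's own statement) =====
-- stated objective: alternative
-- what changed: Replaces A's two sequential early-exit scans over lines with one fused pass that tracks both marker lines simultaneously and breaks once every truthy marker has been found.
import Mathlib
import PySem

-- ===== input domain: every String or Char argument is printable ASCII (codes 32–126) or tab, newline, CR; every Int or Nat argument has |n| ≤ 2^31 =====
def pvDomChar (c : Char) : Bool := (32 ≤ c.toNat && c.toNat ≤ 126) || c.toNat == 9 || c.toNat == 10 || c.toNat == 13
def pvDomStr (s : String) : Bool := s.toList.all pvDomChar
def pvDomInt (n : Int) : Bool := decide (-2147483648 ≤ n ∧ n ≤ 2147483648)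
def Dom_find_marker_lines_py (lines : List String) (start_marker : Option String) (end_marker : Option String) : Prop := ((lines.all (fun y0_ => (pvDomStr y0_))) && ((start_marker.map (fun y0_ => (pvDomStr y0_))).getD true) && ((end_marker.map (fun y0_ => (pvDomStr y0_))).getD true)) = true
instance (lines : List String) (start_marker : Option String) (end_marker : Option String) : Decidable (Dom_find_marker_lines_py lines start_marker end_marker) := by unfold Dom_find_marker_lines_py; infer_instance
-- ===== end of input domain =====

-- B replaces A's two sequential early-exit scans with one fused pass tracking both markers (alternative decomposition; same cost).


-- ===== PORT A =====
-- A-side helper: 'for i, ln in enumerate(lines, start=1): if marker in ln: return i' (early-exit scan)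
def scanFirst (lines : List String) (marker : String) (i : Int) : Option Int :=
  match lines with
  | [] => none
  | ln :: rest => if PySem.Str.isIn marker ln then some i else scanFirst rest marker (i + 1)

def find_marker_lines_py (lines : List String) (start_marker : Option String) (end_marker : Option String) : Option Int × Option Int :=
  -- `if start_marker:` — truthy means not None and non-empty
  let start_marker_line :=
    match start_marker with
    | some m => if m ≠ "" then scanFirst lines m 1 else none
    | none => none
  let end_marker_line :=
    match end_marker with
    | some m => if m ≠ "" then scanFirst lines m 1 else none
    | none => none
  (start_marker_line, end_marker_line)

-- ===== PORT B =====
-- B-side helper: single fused pass, breaking once every active marker is found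
def fusedLoop (ws we : Bool) (sm em : String) (lines : List String) (i : Int)
    (sl el : Option Int) : Option Int × Option Int :=
  match lines with
  | [] => (sl, el)
  | ln :: rest =>
    let sl' := if ws && sl.isNone && PySem.Str.isIn sm ln then some i else sl
    let el' := if we && el.isNone && PySem.Str.isIn em ln then some i else el
    if ((!ws || sl'.isSome) && (!we || el'.isSome)) then (sl', el')
    else fusedLoop ws we sm em rest (i + 1) sl' el'

def find_marker_lines_py_alt (lines : List String) (start_marker : Option String) (end_marker : Option String) : Option Int × Option Int :=
  let sm := start_marker.getD ""
  let em := end_marker.getD ""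
  let ws := !sm.isEmpty
  let we := !em.isEmpty
  fusedLoop ws we sm em lines 1 none none

-- ===== PRECONDITION & SPEC =====
def Spec_find_marker_lines_py (lines : List String) (start_marker : Option String) (end_marker : Option String) (out : Option Int × Option Int) : Prop := out = find_marker_lines_py_alt lines start_marker end_marker
instance (lines : List String) (start_marker : Option String) (end_marker : Option String) (out : Option Int × Option Int) : Decidable (Spec_find_marker_lines_py lines start_marker end_marker out) := by unfold Spec_find_marker_lines_py; infer_instance

-- ===== CLAIM (what is proved, stated in full; the proofs are below) =====
def Claim_equal_find_marker_lines_py : Prop := ∀ (lines : List String) (start_marker : Option String) (end_marker : Option String), Dom_find_marker_lines_py lines start_marker end_marker → Spec_find_marker_lines_py lines start_marker end_marker (find_marker_lines_py lines start_marker end_marker)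

-- ===== LEMMAS AND PROOFS =====
-- Invariant of the fused loop: its result is, componentwise, the early-exit scan of the
-- corresponding marker (from position i) when that marker is active and not yet found.
theorem fusedLoop_eq (ws we : Bool) (sm em : String) (lines : List String) (i : Int)
    (sl el : Option Int) :
    fusedLoop ws we sm em lines i sl el =
      ((if ws = true ∧ sl = none then scanFirst lines sm i else sl),
       (if we = true ∧ el = none then scanFirst lines em i else el)) := by
  induction lines generalizing i sl el with
  | nil =>
    simp only [fusedLoop, scanFirst]
    split_ifs <;> simp_all
  | cons ln rest ih =>
    simp only [fusedLoop, scanFirst]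
    cases ws <;> cases we <;> cases sl <;> cases el <;>
      by_cases hs : PySem.Str.isIn sm ln <;> by_cases he : PySem.Str.isIn em ln <;>
      simp_all [ih]

theorem find_marker_lines_py_spec : Claim_equal_find_marker_lines_py := by
  intro lines s e _
  show find_marker_lines_py lines s e = find_marker_lines_py_alt lines s e
  unfold find_marker_lines_py find_marker_lines_py_alt
  rw [fusedLoop_eq]
  cases s with
  | none =>
    cases e with
    | none => simp
    | some m => by_cases hm : m = "" <;> simp [hm, String.isEmpty_iff]
  | some m =>
    cases e with
    | none => by_cases hm : m = "" <;> simp [hm, String.isEmpty_iff]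
    | some m2 =>
      by_cases hm : m = "" <;> by_cases hm2 : m2 = "" <;>
        simp [hm, hm2, String.isEmpty_iff]
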